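-- pv_equiv track=rewrite | github.com/tochiny/discord-note | Message.py | set_info_list
-- ===== SOURCE A (Python) =====
-- def set_info_list(list, limit=24):
--     _list = {}
--     number = 1
--     _list[str(number)] = {}
--     for (index, title) in enumerate(list, start=1):
--         if len(_list[str(number)]) >= limit:
--             number += 1
--             _list[str(number)] = {}
--         _list[str(number)][str(title)] = list[str(title)]
--     return _list
-- ===== SOURCE B (Python) =====
-- def set_info_list(list, limit=24):
--     keys = [str(t) for t in list]
--     _list = {'1': {}}
--     for n, i in enumerate(range(0, len(keys), limit), start=1):
--         _list[str(n)] = {k: list[k] for k in keys[i:i + limit]}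
--     return _list
-- ===== Notes on version B (the rewrite author's own statement) =====
-- stated objective: alternative
-- what changed: B replaces A's running counter with its length-test-and-branch per element (growing the current numbered group inside a dict keyed by str(number)) by first collecting the keys and then building each group positionally, slicing keys[i:i+limit] for i in range(0, len(keys), limit); Pre_ excludes limit <= 0, outside the natural domain of a positive chunk size, where B's range(0, n, limit) raises ValueError (limit = 0) or yields no groups while A returns a degenerate grouping.
-- outside the precondition, e.g. on set_info_list({'a': 'x'}, 0): A returns {'1': {}, '2': {'a': 'x'}}, B raises ValueError
import Mathlib
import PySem

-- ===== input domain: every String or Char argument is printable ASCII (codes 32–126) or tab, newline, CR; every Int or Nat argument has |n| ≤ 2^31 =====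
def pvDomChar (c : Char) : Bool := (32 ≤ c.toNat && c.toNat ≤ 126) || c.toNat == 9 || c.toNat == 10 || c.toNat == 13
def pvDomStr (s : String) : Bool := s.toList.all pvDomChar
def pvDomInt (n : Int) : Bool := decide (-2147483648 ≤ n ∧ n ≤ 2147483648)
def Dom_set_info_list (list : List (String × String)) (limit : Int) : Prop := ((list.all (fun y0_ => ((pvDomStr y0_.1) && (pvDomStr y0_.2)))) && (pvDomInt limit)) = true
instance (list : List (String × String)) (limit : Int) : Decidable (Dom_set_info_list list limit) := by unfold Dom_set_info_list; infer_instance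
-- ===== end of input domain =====

-- B builds the groups positionally by slicing a prebuilt key list instead of A's running counter
-- with a per-element length test; alternative decomposition, same asymptotic cost.


-- ===== PORT A =====
def set_info_list (list : List (String × String)) (limit : Int) : List (String × List (String × String)) :=
  let d := PySem.Dict.ofList list
  let number : Int := 1
  let init : PySem.Dict String (PySem.Dict String String) × Int :=
    (PySem.Dict.empty.insert (PySem.Int.toStr number) PySem.Dict.empty, number)
  let st := (PySem.List.enumerate d.keys 1).foldl
    (fun st p =>
      let title := p.2
      let st1 : PySem.Dict String (PySem.Dict String String) × Int :=
        if ((st.1.getD (PySem.Int.toStr st.2) PySem.Dict.empty).size : Int) ≥ limit then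
          (st.1.insert (PySem.Int.toStr (st.2 + 1)) PySem.Dict.empty, st.2 + 1)
        else st
      (st1.1.modify (PySem.Int.toStr st1.2) PySem.Dict.empty
        (fun g => g.insert title (d.getD title "")), st1.2))
    init
  st.1.items.map (fun p => (p.1, p.2.items))

-- ===== PORT B =====
def set_info_list_alt (list : List (String × String)) (limit : Int) : List (String × List (String × String)) :=
  let d := PySem.Dict.ofList list
  let keys := d.keys
  let res := (PySem.List.enumerate (PySem.List.pyRange 0 (keys.length : Int) limit) 1).foldl
    (fun acc p =>
      acc.insert (PySem.Int.toStr p.1)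
        ((PySem.List.slice keys (some p.2) (some (p.2 + limit))).foldl
          (fun g k => g.insert k (d.getD k "")) PySem.Dict.empty))
    (PySem.Dict.empty.insert "1" PySem.Dict.empty)
  res.items.map (fun p => (p.1, p.2.items))

-- ===== PRECONDITION & SPEC =====
-- Pre_ excludes limit ≤ 0 (a nonpositive chunk size, outside the function's natural domain):
-- there A returns a degenerate grouping while B's range(0, n, limit) raises ValueError (limit = 0)
-- or yields no groups (limit < 0).
def Pre_set_info_list (list : List (String × String)) (limit : Int) : Prop := 1 ≤ limit
instance (list : List (String × String)) (limit : Int) : Decidable (Pre_set_info_list list limit) := by unfold Pre_set_info_list; infer_instance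
def pvWitness_set_info_list : (List (String × String)) × Int := ([("a", "x"), ("b", "y"), ("c", "z")], 2)
def Spec_set_info_list (list : List (String × String)) (limit : Int) (out : List (String × List (String × String))) : Prop := out = set_info_list_alt list limit
instance (list : List (String × String)) (limit : Int) (out : List (String × List (String × String))) : Decidable (Spec_set_info_list list limit out) := by unfold Spec_set_info_list; infer_instance

-- ===== CLAIM (what is proved, stated in full; the proofs are below) =====
def Claim_equal_set_info_list : Prop := ∀ (list : List (String × String)) (limit : Int), Dom_set_info_list list limit → Pre_set_info_list list limit → Spec_set_info_list list limit (set_info_list list limit)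

-- ===== LEMMAS AND PROOFS =====

-- str(n) as a digit-list, by structural recursion on the number (tail digit last)
def pvRep (n : Nat) : List Char :=
  if h : n < 10 then [Nat.digitChar n]
  else pvRep (n / 10) ++ [Nat.digitChar (n % 10)]
  decreasing_by exact Nat.div_lt_self (by omega) (by omega)

theorem pvDigitChar_inj : ∀ a < 10, ∀ b < 10, Nat.digitChar a = Nat.digitChar b → a = b := by
  decide

theorem pvCore_eq (f : Nat) : ∀ (n : Nat) (acc : List Char), n < f →
    Nat.toDigitsCore 10 f n acc = pvRep n ++ acc := by
  induction f with
  | zero => intro n acc h; omega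
  | succ f ih =>
    intro n acc h
    by_cases h10 : n < 10
    · have hdiv : n / 10 = 0 := Nat.div_eq_of_lt h10
      have hstep : Nat.toDigitsCore 10 (f + 1) n acc = (n % 10).digitChar :: acc := by
        rw [Nat.toDigitsCore]; simp [hdiv]
      rw [hstep]
      conv_rhs => rw [pvRep]
      rw [dif_pos h10, Nat.mod_eq_of_lt h10]
      simp
    · have hdiv : ¬ n / 10 = 0 := by
        intro h0; exact h10 (by omega : n < 10)
      have hstep : Nat.toDigitsCore 10 (f + 1) n acc
          = Nat.toDigitsCore 10 f (n / 10) ((n % 10).digitChar :: acc) := by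
        rw [Nat.toDigitsCore]; simp [hdiv]
      rw [hstep, ih (n / 10) _ (by omega)]
      conv_rhs => rw [pvRep]
      rw [dif_neg h10]
      simp

theorem pvRep_ne_nil (k : Nat) : pvRep k ≠ [] := by
  rw [pvRep]; split <;> simp

theorem pvRep_inj : ∀ (m n : Nat), pvRep m = pvRep n → m = n := by
  intro m
  induction m using Nat.strong_induction_on with
  | _ m ih =>
    intro n h
    have em : ∀ k, k < 10 → pvRep k = [Nat.digitChar k] := by
      intro k hk; rw [pvRep, dif_pos hk]
    have en : ∀ k, ¬ k < 10 → pvRep k = pvRep (k / 10) ++ [Nat.digitChar (k % 10)] := by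
      intro k hk; rw [pvRep, dif_neg hk]
    by_cases hm : m < 10 <;> by_cases hn : n < 10
    · rw [em m hm, em n hn] at h
      exact pvDigitChar_inj m hm n hn (List.singleton_inj.mp h)
    · exfalso
      rw [em m hm, en n hn] at h
      have h0 : (pvRep (n / 10)).length = 0 := by
        have hl := congrArg List.length h
        simp only [List.length_append, List.length_cons, List.length_nil] at hl
        omega
      exact pvRep_ne_nil _ (List.eq_nil_of_length_eq_zero h0)
    · exfalso
      rw [en m hm, em n hn] at h
      have h0 : (pvRep (m / 10)).length = 0 := by
        have hl := congrArg List.length h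
        simp only [List.length_append, List.length_cons, List.length_nil] at hl
        omega
      exact pvRep_ne_nil _ (List.eq_nil_of_length_eq_zero h0)
    · rw [en m hm, en n hn] at h
      obtain ⟨h1, h2⟩ := List.append_inj' h (by simp)
      have e1 : m / 10 = n / 10 := ih (m / 10) (Nat.div_lt_self (by omega) (by omega)) _ h1
      have e2 : m % 10 = n % 10 :=
        pvDigitChar_inj _ (Nat.mod_lt _ (by omega)) _ (Nat.mod_lt _ (by omega))
          (List.singleton_inj.mp h2)
      omega

theorem pvToStr_inj (m n : Int) (hm : 0 ≤ m) (hn : 0 ≤ n)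
    (h : PySem.Int.toStr m = PySem.Int.toStr n) : m = n := by
  have h' := congrArg String.toList h
  rw [PySem.Int.toList_toStr, PySem.Int.toList_toStr] at h'
  unfold PySem.Int.toChars at h'
  rw [if_neg (by omega), if_neg (by omega)] at h'
  unfold Nat.toDigits at h'
  rw [pvCore_eq _ _ _ (Nat.lt_succ_self _), pvCore_eq _ _ _ (Nat.lt_succ_self _)] at h'
  simp only [List.append_nil] at h'
  have := pvRep_inj _ _ h'
  omega

theorem pvToStr_ne (m n : Int) (hm : 0 ≤ m) (hn : 0 ≤ n) (h : m ≠ n) :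
    PySem.Int.toStr m ≠ PySem.Int.toStr n := fun he => h (pvToStr_inj m n hm hn he)

-- value looked up for a key
def pvV (d : PySem.Dict String String) (k : String) : String := d.getD k ""

-- dict comprehension over a key list
def pvInsAll (d : PySem.Dict String String) (g : PySem.Dict String String) (ks : List String) :
    PySem.Dict String String :=
  ks.foldl (fun g k => g.insert k (pvV d k)) g

-- the group list A's loop produces from current group g numbered n
def pvBuild (d : PySem.Dict String String) (limit : Int) (g : PySem.Dict String String) (n : Int) :
    List String → List (String × PySem.Dict String String)
  | [] => [(PySem.Int.toStr n, g)]
  | k :: ks =>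
    if (g.size : Int) ≥ limit then
      (PySem.Int.toStr n, g) :: pvBuild d limit (PySem.Dict.empty.insert k (pvV d k)) (n + 1) ks
    else pvBuild d limit (g.insert k (pvV d k)) n ks

-- the group list B produces from chunk size c+1, starting number n
def pvTail (d : PySem.Dict String String) (c : Nat) (n : Int) :
    List String → List (String × PySem.Dict String String)
  | [] => []
  | k :: ks =>
    (PySem.Int.toStr n, pvInsAll d PySem.Dict.empty ((k :: ks).take (c + 1))) ::
      pvTail d c (n + 1) ((k :: ks).drop (c + 1))
  termination_by ks => ks.length
  decreasing_by simp

-- no key numbered ≥ n occurs in l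
def pvFresh (n : Int) (l : List (String × PySem.Dict String String)) : Prop :=
  ∀ m : Int, n ≤ m → PySem.Int.toStr m ∉ l.map Prod.fst

theorem pvFind_last (l : List (String × PySem.Dict String String)) (s : String)
    (g : PySem.Dict String String) (h : s ∉ l.map Prod.fst) :
    List.find? (fun p => p.1 == s) (l ++ [(s, g)]) = some (s, g) := by
  induction l with
  | nil => simp
  | cons a l ih =>
    simp only [List.map_cons, List.mem_cons] at h
    push_neg at h
    rw [List.cons_append, List.find?_cons_of_neg (by simp [h.1.symm]), ih h.2]

theorem pvGetD_last (l : List (String × PySem.Dict String String)) (s : String)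
    (g dflt : PySem.Dict String String) (h : s ∉ l.map Prod.fst) :
    (PySem.Dict.mk (l ++ [(s, g)])).getD s dflt = g := by
  simp [PySem.Dict.getD, PySem.Dict.get?, pvFind_last l s g h]

theorem pvContains_last_false (l : List (String × PySem.Dict String String)) (s k : String)
    (g : PySem.Dict String String) (h1 : k ∉ l.map Prod.fst) (h2 : k ≠ s) :
    (PySem.Dict.mk (l ++ [(s, g)])).contains k = false := by
  simp only [PySem.Dict.contains, List.any_append, List.any_cons, List.any_nil,
    Bool.or_false, Bool.or_eq_false_iff, List.any_eq_false]
  constructor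
  · intro p hp hpk
    exact h1 (List.mem_map.mpr ⟨p, hp, by simpa using hpk⟩)
  · simpa using fun e => h2 e.symm

theorem pvInsert_last (l : List (String × PySem.Dict String String)) (s k : String)
    (g v : PySem.Dict String String) (h1 : k ∉ l.map Prod.fst) (h2 : k ≠ s) :
    (PySem.Dict.mk (l ++ [(s, g)])).insert k v = PySem.Dict.mk (l ++ [(s, g)] ++ [(k, v)]) := by
  apply PySem.Dict.ext
  rw [PySem.Dict.items_insert_of_not_contains _ _ (pvContains_last_false l s k g h1 h2)]

theorem pvModify_last (l : List (String × PySem.Dict String String)) (s : String)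
    (g d0 : PySem.Dict String String) (f : PySem.Dict String String → PySem.Dict String String)
    (h : s ∉ l.map Prod.fst) :
    (PySem.Dict.mk (l ++ [(s, g)])).modify s d0 f = PySem.Dict.mk (l ++ [(s, f g)]) := by
  unfold PySem.Dict.modify
  rw [pvGetD_last l s g d0 h]
  have hc : (PySem.Dict.mk (l ++ [(s, g)])).contains s = true := by
    apply (PySem.Dict.contains_iff_mem_keys _ _).mpr
    simp [PySem.Dict.keys]
  apply PySem.Dict.ext
  rw [PySem.Dict.items_insert_of_contains _ _ hc]
  show List.map _ (l ++ [(s, g)]) = _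
  rw [List.map_append]
  congr 1
  · rw [List.map_congr_left, List.map_id]
    intro p hp
    have : p.1 ≠ s := fun e => h (List.mem_map.mpr ⟨p, hp, e⟩)
    simp [this]
  · simp

theorem pvFoldEnum {σ α : Type} (f : σ → α → σ) : ∀ (xs : List α) (s : Int) (st : σ),
    (PySem.List.enumerate xs s).foldl (fun st p => f st p.2) st = xs.foldl f st := by
  intro xs
  induction xs with
  | nil => intro s st; simp [PySem.List.enumerate]
  | cons x xs ih => intro s st; rw [PySem.List.enumerate_cons]; simp only [List.foldl]; exact ih _ _

theorem pvRange_nil (a b s : Int) (hs : 0 < s) (h : b ≤ a) : PySem.List.pyRange a b s = [] := by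
  rw [PySem.List.pyRange_of_pos a b hs, if_neg (by omega)]; simp

theorem pvRange_cons (a b s : Int) (hs : 0 < s) (h : a < b) :
    PySem.List.pyRange a b s = a :: PySem.List.pyRange (a + s) b s := by
  rw [PySem.List.pyRange_of_pos a b hs, PySem.List.pyRange_of_pos (a + s) b hs]
  have hnum : 0 ≤ b - a - 1 := by omega
  have hdvd : (b - a + s - 1) / s = (b - a - 1) / s + 1 := by
    have := Int.add_mul_ediv_right (b - a - 1) 1 (ne_of_gt hs)
    rw [one_mul] at this
    rw [show b - a + s - 1 = b - a - 1 + s by ring, this]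
  have hq0 : 0 ≤ (b - a - 1) / s := Int.ediv_nonneg hnum (le_of_lt hs)
  rw [if_pos h, hdvd]
  by_cases h2 : a + s < b
  · rw [if_pos h2]
    have : ((b - a - 1) / s + 1).toNat = ((b - (a + s) + s - 1) / s).toNat + 1 := by
      have : b - (a + s) + s - 1 = b - a - 1 := by ring
      rw [this]; omega
    rw [this, List.range_succ_eq_map]
    simp only [List.map_cons, List.map_map, Nat.cast_zero, mul_zero, add_zero]
    congr 1
    apply List.map_congr_left
    intro k _
    simp only [Function.comp_apply]
    push_cast
    ring
  · rw [if_neg h2]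
    have hzero : (b - a - 1) / s = 0 := by
      apply Int.ediv_eq_zero_of_lt hnum; omega
    rw [hzero]
    simp

theorem pvContains_mk_false (l : List (String × PySem.Dict String String)) (k : String)
    (h : k ∉ l.map Prod.fst) : (PySem.Dict.mk l).contains k = false := by
  simp only [PySem.Dict.contains, List.any_eq_false]
  intro p hp
  simpa using fun e => h (List.mem_map.mpr ⟨p, hp, e⟩)

theorem pvInsert_mk_fresh (l : List (String × PySem.Dict String String)) (k : String)
    (v : PySem.Dict String String) (h : k ∉ l.map Prod.fst) :
    (PySem.Dict.mk l).insert k v = PySem.Dict.mk (l ++ [(k, v)]) := by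
  apply PySem.Dict.ext
  rw [PySem.Dict.items_insert_of_not_contains _ _ (pvContains_mk_false l k h)]

theorem pvSize_insert_fresh (g : PySem.Dict String String) (k v : String)
    (h : g.contains k = false) : (g.insert k v).size = g.size + 1 := by
  rw [PySem.Dict.size_insert, if_neg (by simp [h])]

theorem pvFresh_nil (n : Int) : pvFresh n [] := by
  intro m _ hm; simp at hm

theorem pvFresh_snoc (n : Int) (pre : List (String × PySem.Dict String String))
    (g : PySem.Dict String String) (hn : 1 ≤ n) (hf : pvFresh n pre) :
    pvFresh (n + 1) (pre ++ [(PySem.Int.toStr n, g)]) := by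
  intro m hm
  simp only [List.map_append, List.map_cons, List.map_nil, List.mem_append, List.mem_singleton]
  push_neg
  exact ⟨hf m (by omega), pvToStr_ne m n (by omega) (by omega) (by omega)⟩

-- one step of A's loop
def pvAStep (d : PySem.Dict String String) (limit : Int)
    (st : PySem.Dict String (PySem.Dict String String) × Int) (title : String) :
    PySem.Dict String (PySem.Dict String String) × Int :=
  let st1 : PySem.Dict String (PySem.Dict String String) × Int :=
    if ((st.1.getD (PySem.Int.toStr st.2) PySem.Dict.empty).size : Int) ≥ limit then
      (st.1.insert (PySem.Int.toStr (st.2 + 1)) PySem.Dict.empty, st.2 + 1)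
    else st
  (st1.1.modify (PySem.Int.toStr st1.2) PySem.Dict.empty
    (fun g => g.insert title (d.getD title "")), st1.2)

theorem pvAStep_full (d : PySem.Dict String String) (limit : Int)
    (pre : List (String × PySem.Dict String String)) (g : PySem.Dict String String)
    (n : Int) (k : String) (hn : 1 ≤ n) (hf : pvFresh n pre)
    (hc : ((g.size : Int) ≥ limit)) :
    pvAStep d limit (PySem.Dict.mk (pre ++ [(PySem.Int.toStr n, g)]), n) k =
      (PySem.Dict.mk ((pre ++ [(PySem.Int.toStr n, g)]) ++
        [(PySem.Int.toStr (n + 1), PySem.Dict.empty.insert k (d.getD k ""))]), n + 1) := by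
  have hfr1 : PySem.Int.toStr (n + 1) ∉ (pre ++ [(PySem.Int.toStr n, g)]).map Prod.fst := by
    have := pvFresh_snoc n pre g hn hf
    exact this (n + 1) le_rfl
  unfold pvAStep
  simp only [pvGetD_last pre (PySem.Int.toStr n) g PySem.Dict.empty (hf n le_rfl), if_pos hc]
  rw [pvInsert_last pre (PySem.Int.toStr n) (PySem.Int.toStr (n + 1)) g PySem.Dict.empty
        (pvFresh_snoc n pre g hn hf (n + 1) le_rfl |> fun h => by
          simp only [List.map_append, List.map_cons, List.map_nil, List.mem_append,
            List.mem_singleton] at h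
          exact fun hx => h (Or.inl hx))
        (pvToStr_ne (n + 1) n (by omega) (by omega) (by omega))]
  rw [pvModify_last (pre ++ [(PySem.Int.toStr n, g)]) (PySem.Int.toStr (n + 1))
        PySem.Dict.empty PySem.Dict.empty _ hfr1]

theorem pvAStep_small (d : PySem.Dict String String) (limit : Int)
    (pre : List (String × PySem.Dict String String)) (g : PySem.Dict String String)
    (n : Int) (k : String) (hf : pvFresh n pre)
    (hc : ¬ ((g.size : Int) ≥ limit)) :
    pvAStep d limit (PySem.Dict.mk (pre ++ [(PySem.Int.toStr n, g)]), n) k =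
      (PySem.Dict.mk (pre ++ [(PySem.Int.toStr n, g.insert k (d.getD k ""))]), n) := by
  unfold pvAStep
  simp only [pvGetD_last pre (PySem.Int.toStr n) g PySem.Dict.empty (hf n le_rfl), if_neg hc]
  rw [pvModify_last pre (PySem.Int.toStr n) g PySem.Dict.empty _ (hf n le_rfl)]

-- A's loop, from state (pre ++ [(str n, g)], n), appends exactly pvBuild g n ks
theorem pvA_loop (d : PySem.Dict String String) (limit : Int) :
    ∀ (ks : List String) (pre : List (String × PySem.Dict String String))
      (g : PySem.Dict String String) (n : Int), 1 ≤ n → pvFresh n pre →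
    (ks.foldl (pvAStep d limit) (PySem.Dict.mk (pre ++ [(PySem.Int.toStr n, g)]), n)).1
    = PySem.Dict.mk (pre ++ pvBuild d limit g n ks) := by
  intro ks
  induction ks with
  | nil => intro pre g n hn hf; simp [pvBuild]
  | cons k ks ih =>
    intro pre g n hn hf
    rw [List.foldl_cons]
    by_cases hc : ((g.size : Int) ≥ limit)
    · rw [pvAStep_full d limit pre g n k hn hf hc]
      rw [ih (pre ++ [(PySem.Int.toStr n, g)]) _ (n + 1) (by omega) (pvFresh_snoc n pre g hn hf)]
      rw [show pvBuild d limit g n (k :: ks)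
            = (PySem.Int.toStr n, g) ::
                pvBuild d limit (PySem.Dict.empty.insert k (pvV d k)) (n + 1) ks by
          rw [pvBuild, if_pos hc]]
      simp [pvV]
    · rw [pvAStep_small d limit pre g n k hf hc]
      rw [ih pre _ n hn hf]
      rw [show pvBuild d limit g n (k :: ks)
            = pvBuild d limit (g.insert k (pvV d k)) n ks by rw [pvBuild, if_neg hc]]
      simp [pvV]

-- bridge: pvBuild equals the positional chunk list
theorem pvBuild_eq_tail (d : PySem.Dict String String) (c : Nat) :
    ∀ (ks : List String), ks.Nodup → ∀ (g : PySem.Dict String String) (n : Int),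
      g.size ≤ c + 1 → (∀ k ∈ ks, g.contains k = false) →
    pvBuild d ((c : Int) + 1) g n ks =
      if g.size < c + 1 then
        (PySem.Int.toStr n, pvInsAll d g (ks.take (c + 1 - g.size))) ::
          pvTail d c (n + 1) (ks.drop (c + 1 - g.size))
      else (PySem.Int.toStr n, g) :: pvTail d c (n + 1) ks := by
  suffices H : ∀ (N : Nat) (ks : List String), ks.length ≤ N → ks.Nodup →
      ∀ (g : PySem.Dict String String) (n : Int),
      g.size ≤ c + 1 → (∀ k ∈ ks, g.contains k = false) →
      pvBuild d ((c : Int) + 1) g n ks =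
        if g.size < c + 1 then
          (PySem.Int.toStr n, pvInsAll d g (ks.take (c + 1 - g.size))) ::
            pvTail d c (n + 1) (ks.drop (c + 1 - g.size))
        else (PySem.Int.toStr n, g) :: pvTail d c (n + 1) ks by
    exact fun ks => H ks.length ks le_rfl
  intro N
  induction N with
  | zero =>
    intro ks hlen hnd g n hsz hcf
    have hks : ks = [] := List.eq_nil_of_length_eq_zero (by omega)
    subst hks
    split_ifs <;> simp [pvBuild, pvInsAll, pvTail]
  | succ N ih =>
    intro ks hlen hnd g n hsz hcf
    cases ks with
    | nil => split_ifs <;> simp [pvBuild, pvInsAll, pvTail]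
    | cons k ks =>
      rw [List.nodup_cons] at hnd
      obtain ⟨hk, hnd'⟩ := hnd
      have hck : g.contains k = false := hcf k (by simp)
      have hcf' : ∀ k' ∈ ks, g.contains k' = false := fun k' h => hcf k' (by simp [h])
      by_cases hlt : g.size < c + 1
      · rw [if_pos hlt]
        rw [show pvBuild d ((c : Int) + 1) g n (k :: ks)
              = pvBuild d ((c : Int) + 1) (g.insert k (pvV d k)) n ks by
            rw [pvBuild, if_neg (by push_cast; omega)]]
        have hsz' : (g.insert k (pvV d k)).size = g.size + 1 := pvSize_insert_fresh g k _ hck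
        have hcf'' : ∀ k' ∈ ks, (g.insert k (pvV d k)).contains k' = false := by
          intro k' h
          rw [PySem.Dict.contains_insert]
          have : k' ≠ k := fun e => hk (e ▸ h)
          simp [this, hcf' k' h]
        rw [ih ks (by simp only [List.length_cons] at hlen; omega) hnd' _ n (by omega) hcf'']
        by_cases hlt2 : (g.insert k (pvV d k)).size < c + 1
        · rw [if_pos hlt2]
          have e1 : c + 1 - g.size = (c - g.size) + 1 := by omega
          have e2 : c + 1 - (g.insert k (pvV d k)).size = c - g.size := by omega
          rw [e1, e2, List.take_succ_cons, List.drop_succ_cons]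
          simp [pvInsAll]
        · rw [if_neg hlt2]
          have e1 : c + 1 - g.size = 1 := by omega
          rw [e1]
          simp [pvInsAll]
      · rw [if_neg hlt]
        have heq : g.size = c + 1 := by omega
        rw [show pvBuild d ((c : Int) + 1) g n (k :: ks)
              = (PySem.Int.toStr n, g) ::
                  pvBuild d ((c : Int) + 1) (PySem.Dict.empty.insert k (pvV d k)) (n + 1) ks by
            rw [pvBuild, if_pos (by push_cast; omega)]]
        have hsz1 : (PySem.Dict.empty.insert k (pvV d k)).size = 1 := by
          rw [pvSize_insert_fresh _ k _ (PySem.Dict.contains_empty k), PySem.Dict.size_empty]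
        have hcf1 : ∀ k' ∈ ks, (PySem.Dict.empty.insert k (pvV d k)).contains k' = false := by
          intro k' h
          rw [PySem.Dict.contains_insert]
          have : k' ≠ k := fun e => hk (e ▸ h)
          simp [this]
        rw [ih ks (by simp only [List.length_cons] at hlen; omega) hnd' _ (n + 1) (by omega) hcf1]
        rw [pvTail]
        by_cases hc0 : 0 < c
        · rw [if_pos (by omega)]
          have e2 : c + 1 - (PySem.Dict.empty.insert k (pvV d k)).size = c := by omega
          rw [e2, List.take_succ_cons, List.drop_succ_cons]
          simp [pvInsAll]
        · have hc : c = 0 := by omega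
          subst hc
          rw [if_neg (by omega)]
          simp [pvInsAll]

-- B's loop equals the positional chunk list
theorem pvB_loop (d : PySem.Dict String String) (c : Nat) (ks : List String) :
    ∀ (fuel : Nat) (i n : Int) (done : List (String × PySem.Dict String String)),
      0 ≤ i → 1 ≤ n → pvFresh n done → fuel = ks.length - i.toNat →
    ((PySem.List.enumerate (PySem.List.pyRange i (ks.length : Int) ((c : Int) + 1)) n).foldl
      (fun acc p =>
        acc.insert (PySem.Int.toStr p.1)
          ((PySem.List.slice ks (some p.2) (some (p.2 + ((c : Int) + 1)))).foldl
            (fun g k => g.insert k (d.getD k "")) PySem.Dict.empty))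
      (PySem.Dict.mk done))
    = PySem.Dict.mk (done ++ pvTail d c n (ks.drop i.toNat)) := by
  intro fuel
  induction fuel using Nat.strong_induction_on with
  | _ fuel ih =>
    intro i n done hi hn hf hfuel
    by_cases hib : i < (ks.length : Int)
    · have hilt : i.toNat < ks.length := by omega
      rw [pvRange_cons i (ks.length : Int) ((c : Int) + 1) (by omega) hib,
        PySem.List.enumerate_cons, List.foldl_cons]
      dsimp only
      have hslice : PySem.List.slice ks (some i) (some (i + ((c : Int) + 1)))
          = (ks.drop i.toNat).take (c + 1) := by
        rw [PySem.List.slice_toNat ks hi (by omega)]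
        congr 1
        omega
      rw [hslice, pvInsert_mk_fresh done (PySem.Int.toStr n) _ (hf n le_rfl)]
      rw [ih (ks.length - (i + ((c : Int) + 1)).toNat) (by omega) (i + ((c : Int) + 1)) (n + 1)
            _ (by omega) (by omega) (pvFresh_snoc n done _ hn hf) rfl]
      have hne : ks.drop i.toNat ≠ [] := by
        intro h0
        have := congrArg List.length h0
        simp at this
        omega
      obtain ⟨hd, tl, hdt⟩ := List.exists_cons_of_ne_nil hne
      have htl : pvTail d c n (ks.drop i.toNat)
          = (PySem.Int.toStr n, pvInsAll d PySem.Dict.empty ((ks.drop i.toNat).take (c + 1))) ::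
              pvTail d c (n + 1) ((ks.drop i.toNat).drop (c + 1)) := by
        rw [hdt, pvTail, ← hdt]
      have hdd : (ks.drop i.toNat).drop (c + 1) = ks.drop ((i + ((c : Int) + 1)).toNat) := by
        rw [List.drop_drop]
        congr 1
        omega
      rw [htl, hdd]
      simp [pvInsAll, pvV]
    · rw [pvRange_nil i (ks.length : Int) ((c : Int) + 1) (by omega) (by omega)]
      have hdrop : ks.drop i.toNat = [] := List.drop_eq_nil_of_le (by omega)
      rw [hdrop]
      simp [PySem.List.enumerate, pvTail]

-- ===== VERDICT (by name: the statement is the Claim_ definition above) =====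
theorem set_info_list_spec : Claim_equal_set_info_list := by
  intro list limit hdom hpre
  unfold Spec_set_info_list
  unfold Pre_set_info_list at hpre
  obtain ⟨c, hc⟩ : ∃ c : Nat, limit = (c : Int) + 1 := ⟨(limit - 1).toNat, by omega⟩
  subst hc
  set d := PySem.Dict.ofList list with hd
  have hnd : d.keys.Nodup := PySem.Dict.nodup_keys_ofList list
  set ks := d.keys with hks
  have h1 : PySem.Int.toStr 1 = "1" := rfl
  -- A's side: the loop produces pvBuild
  have hA : set_info_list list ((c : Int) + 1)
      = (PySem.Dict.mk ([] ++ pvBuild d ((c : Int) + 1) PySem.Dict.empty 1 ks)).items.map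
          (fun p => (p.1, p.2.items)) := by
    show ((PySem.List.enumerate ks 1).foldl (fun st p => pvAStep d ((c : Int) + 1) st p.2)
        (PySem.Dict.mk ([] ++ [(PySem.Int.toStr 1, PySem.Dict.empty)]), 1)).1.items.map
        (fun p => (p.1, p.2.items)) = _
    rw [pvFoldEnum, pvA_loop d ((c : Int) + 1) ks [] PySem.Dict.empty 1 le_rfl (pvFresh_nil 1)]
  rw [hA, pvBuild_eq_tail d c ks hnd PySem.Dict.empty 1
        (by rw [PySem.Dict.size_empty]; omega) (fun k _ => PySem.Dict.contains_empty k),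
      if_pos (by rw [PySem.Dict.size_empty]; omega)]
  rw [show PySem.Dict.empty.size = 0 from PySem.Dict.size_empty]
  -- B's side
  show _ = ((PySem.List.enumerate (PySem.List.pyRange 0 (ks.length : Int) ((c : Int) + 1)) 1).foldl
      (fun acc p =>
        acc.insert (PySem.Int.toStr p.1)
          ((PySem.List.slice ks (some p.2) (some (p.2 + ((c : Int) + 1)))).foldl
            (fun g k => g.insert k (d.getD k "")) PySem.Dict.empty))
      (PySem.Dict.empty.insert "1" PySem.Dict.empty)).items.map (fun p => (p.1, p.2.items))
  by_cases hE : ks = []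
  · rw [hE]
    rw [show ((([] : List String).length : Nat) : Int) = 0 from by simp]
    rw [pvRange_nil 0 0 ((c : Int) + 1) (by omega) le_rfl]
    have he : (PySem.Dict.empty.insert "1" PySem.Dict.empty
          : PySem.Dict String (PySem.Dict String String))
        = PySem.Dict.mk [("1", PySem.Dict.empty)] := by
      have := pvInsert_mk_fresh [] "1"
          (PySem.Dict.empty : PySem.Dict String String) (by simp)
      simpa using this
    simp [PySem.List.enumerate, pvTail, pvInsAll, he, h1]
  · have hlen : 0 < (ks.length : Int) := by
      have := List.length_pos_of_ne_nil hE
      exact_mod_cast this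
    rw [pvRange_cons 0 (ks.length : Int) ((c : Int) + 1) (by omega) hlen,
      PySem.List.enumerate_cons, List.foldl_cons]
    dsimp only
    have ht0 : ((0 : Int) + ((c : Int) + 1)).toNat = c + 1 := by omega
    have hslice0 : PySem.List.slice ks (some 0) (some (0 + ((c : Int) + 1)))
        = ks.take (c + 1) := by
      rw [PySem.List.slice_toNat ks le_rfl (by omega), ht0]
      simp
    have hacc : (PySem.Dict.empty.insert "1" PySem.Dict.empty).insert (PySem.Int.toStr 1)
          ((ks.take (c + 1)).foldl (fun g k => g.insert k (d.getD k "")) PySem.Dict.empty)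
        = PySem.Dict.mk [(PySem.Int.toStr 1,
            pvInsAll d PySem.Dict.empty (ks.take (c + 1)))] := by
      rw [h1, PySem.Dict.insert_insert_self]
      have hins := pvInsert_mk_fresh [] "1"
          (pvInsAll d PySem.Dict.empty (ks.take (c + 1))) (by simp)
      exact hins
    rw [hslice0, hacc]
    rw [show (1 : Int) + 1 = 2 from by norm_num]
    rw [pvB_loop d c ks (ks.length - ((0 : Int) + ((c : Int) + 1)).toNat)
          ((0 : Int) + ((c : Int) + 1)) 2
          [(PySem.Int.toStr 1, pvInsAll d PySem.Dict.empty (ks.take (c + 1)))]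
          (by omega) (by omega)
          (by
            intro m hm
            simp only [List.map_cons, List.map_nil, List.mem_singleton]
            exact pvToStr_ne m 1 (by omega) (by omega) (by omega))
          rfl]
    rw [ht0]
    simp
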